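-- pv_equiv track=rewrite | github.com/Mboget/Epreuve_pratique | script.py | annee_temperature_minimale
-- ===== SOURCE A (Python) =====
-- def annee_temperature_minimale(tab_temp,tab_annees):
--     assert len(tab_temp) == len(tab_annees)
--
--     mini_temp = tab_temp[0]
--     annee_mini = tab_annees[0]
--
--     for i in range (len(tab_temp)):
--         if tab_temp[i] < mini_temp:
--             mini_temp = tab_temp[i]
--             annee_mini = tab_annees[i]
--
--     return (mini_temp,annee_mini)
-- ===== SOURCE B (Python) =====
-- def annee_temperature_minimale(tab_temp, tab_annees):
--     assert len(tab_temp) == len(tab_annees)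
--     mini = min(tab_temp)
--     return (mini, tab_annees[tab_temp.index(mini)])
-- ===== Notes on version B (the rewrite author's own statement) =====
-- stated objective: simpler
-- what changed: Replaces the hand-written running-minimum loop over indices by min() to get the minimum value and .index() to locate its first occurrence, indexing the years list once.
import Mathlib
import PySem

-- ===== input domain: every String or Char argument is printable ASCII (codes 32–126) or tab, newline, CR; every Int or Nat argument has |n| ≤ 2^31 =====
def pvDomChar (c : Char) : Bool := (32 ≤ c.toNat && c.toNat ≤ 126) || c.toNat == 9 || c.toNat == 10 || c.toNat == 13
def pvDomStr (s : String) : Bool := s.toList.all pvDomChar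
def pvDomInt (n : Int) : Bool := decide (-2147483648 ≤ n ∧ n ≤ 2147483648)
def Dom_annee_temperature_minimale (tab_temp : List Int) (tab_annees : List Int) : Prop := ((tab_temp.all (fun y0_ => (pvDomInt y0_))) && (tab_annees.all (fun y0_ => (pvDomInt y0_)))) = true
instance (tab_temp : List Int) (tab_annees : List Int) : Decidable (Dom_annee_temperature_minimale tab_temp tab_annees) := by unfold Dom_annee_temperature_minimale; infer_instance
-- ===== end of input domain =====

-- B replaces the hand-written running-minimum loop by min() + .index(): simpler decomposition, same O(n) cost.

-- ===== PORT A =====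
-- A's loop over range(len(tab_temp)), keeping the strictly smaller temperature and its year.
-- Out-of-range accesses (empty input, reached only outside Pre_) are totalized with .getD 0.
def annee_temperature_minimale (tab_temp : List Int) (tab_annees : List Int) : Int × Int :=
  let init : Int × Int := ((PySem.List.pyGet? tab_temp 0).getD 0, (PySem.List.pyGet? tab_annees 0).getD 0)
  (PySem.List.pyRange 0 tab_temp.length 1).foldl
    (fun st i =>
      let ti := (PySem.List.pyGet? tab_temp i).getD 0
      if ti < st.1 then (ti, (PySem.List.pyGet? tab_annees i).getD 0) else st)
    init

-- ===== PORT B =====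
-- B: mini = min(tab_temp); return (mini, tab_annees[tab_temp.index(mini)]).
def annee_temperature_minimale_alt (tab_temp : List Int) (tab_annees : List Int) : Int × Int :=
  let mini := (PySem.List.min? tab_temp (fun x => x)).getD 0
  let idx : Nat := (PySem.List.index? tab_temp mini).getD 0
  (mini, (PySem.List.pyGet? tab_annees (idx : Int)).getD 0)

-- ===== PRECONDITION & SPEC =====
-- Pre_ excludes exactly the inputs where A raises: empty tab_temp (IndexError at tab_temp[0])
-- and mismatched lengths (AssertionError); B also raises on both.
def Pre_annee_temperature_minimale (tab_temp : List Int) (tab_annees : List Int) : Prop :=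
  tab_temp ≠ [] ∧ tab_temp.length = tab_annees.length
instance (tab_temp : List Int) (tab_annees : List Int) : Decidable (Pre_annee_temperature_minimale tab_temp tab_annees) := by unfold Pre_annee_temperature_minimale; infer_instance

def pvWitness_annee_temperature_minimale : List Int × List Int := ([3, -1, 2], [2001, 2002, 2003])

def Spec_annee_temperature_minimale (tab_temp : List Int) (tab_annees : List Int) (out : Int × Int) : Prop := out = annee_temperature_minimale_alt tab_temp tab_annees
instance (tab_temp : List Int) (tab_annees : List Int) (out : Int × Int) : Decidable (Spec_annee_temperature_minimale tab_temp tab_annees out) := by unfold Spec_annee_temperature_minimale; infer_instance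

-- ===== CLAIM (what is proved, stated in full; the proofs are below) =====
def Claim_equal_annee_temperature_minimale : Prop := ∀ (tab_temp : List Int) (tab_annees : List Int), Dom_annee_temperature_minimale tab_temp tab_annees → Pre_annee_temperature_minimale tab_temp tab_annees → Spec_annee_temperature_minimale tab_temp tab_annees (annee_temperature_minimale tab_temp tab_annees)

-- ===== LEMMAS AND PROOFS =====

-- The first-strict-minimum pair fold (A's loop body on a zipped list).
def pvLoop (st : Int × Int) (l : List (Int × Int)) : Int × Int :=
  l.foldl (fun st p => if p.1 < st.1 then p else st) st

-- Year of the first pair attaining value m.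
def pvFindYear (m : Int) (l : List (Int × Int)) : Int :=
  match l with
  | [] => 0
  | (v, w) :: l => if v = m then w else pvFindYear m l

theorem pv_foldl_min_le (l : List Int) (x : Int) : l.foldl min x ≤ x := by
  induction l generalizing x with
  | nil => simp
  | cons v l ih =>
      calc (v :: l).foldl min x = l.foldl min (min x v) := rfl
        _ ≤ min x v := ih _
        _ ≤ x := min_le_left _ _

theorem pv_foldl_min_mem (l : List Int) (x : Int) :
    l.foldl min x = x ∨ l.foldl min x ∈ l := by
  induction l generalizing x with
  | nil => simp
  | cons v l ih =>
      rcases ih (min x v) with h | h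
      · rcases min_choice x v with hx | hv
        · left; rw [List.foldl_cons, h]; exact hx
        · right
          have hv' : (v :: l).foldl min x = v := by rw [List.foldl_cons, h]; exact hv
          rw [hv']; exact List.mem_cons_self
      · right; simp [List.foldl_cons, h]

-- Core characterisation of A's loop on the zipped list.
theorem pv_loop_eq (l : List (Int × Int)) (x y : Int) :
    pvLoop (x, y) l =
      ((l.map Prod.fst).foldl min x,
        if x = (l.map Prod.fst).foldl min x then y
        else pvFindYear ((l.map Prod.fst).foldl min x) l) := by
  induction l generalizing x y with
  | nil => simp [pvLoop]
  | cons p l ih =>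
      obtain ⟨v, w⟩ := p
      by_cases hvx : v < x
      · have hmin : min x v = v := by omega
        have hstep : pvLoop (x, y) ((v, w) :: l) = pvLoop (v, w) l := by
          simp [pvLoop, hvx]
        rw [hstep, ih]
        have hm : (((v, w) :: l).map Prod.fst).foldl min x = (l.map Prod.fst).foldl min v := by
          simp [List.foldl_cons, hmin]
        have hle : (l.map Prod.fst).foldl min v ≤ v := pv_foldl_min_le _ _
        have hxne : ¬ (x = (l.map Prod.fst).foldl min v) := by omega
        rw [hm]
        simp only [if_neg hxne, pvFindYear]
      · have hmin : min x v = x := by omega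
        have hstep : pvLoop (x, y) ((v, w) :: l) = pvLoop (x, y) l := by
          simp [pvLoop, hvx]
        rw [hstep, ih]
        have hm : (((v, w) :: l).map Prod.fst).foldl min x = (l.map Prod.fst).foldl min x := by
          simp [List.foldl_cons, hmin]
        have hle : (l.map Prod.fst).foldl min x ≤ x := pv_foldl_min_le _ _
        rw [hm]
        by_cases hxm : x = (l.map Prod.fst).foldl min x
        · simp only [if_pos hxm]
        · have hvm : ¬ (v = (l.map Prod.fst).foldl min x) := by omega
          simp only [if_neg hxm, pvFindYear, if_neg hvm]

-- A's index loop over pyRange equals pvLoop on the zipped suffix, with a consumed prefix.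
theorem pv_fold_range_eq (t a pre_t pre_a : List Int)
    (hlen : pre_t.length = pre_a.length) (ht : t.length = a.length) (init : Int × Int) :
    (PySem.List.pyRange pre_t.length (pre_t ++ t).length 1).foldl
      (fun st i =>
        let ti := (PySem.List.pyGet? (pre_t ++ t) i).getD 0
        if ti < st.1 then (ti, (PySem.List.pyGet? (pre_a ++ a) i).getD 0) else st)
      init = pvLoop init (t.zip a) := by
  induction t generalizing a pre_t pre_a init with
  | nil => simp [pvLoop]
  | cons v t ih =>
      obtain ⟨w, a, rfl⟩ : ∃ w a', a = w :: a' := by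
        cases a with
        | nil => exact absurd ht (by simp)
        | cons w a' => exact ⟨w, a', rfl⟩
      have hlt : (pre_t.length : Int) < ((pre_t ++ v :: t).length : Int) := by
        simp
      rw [PySem.List.pyRange_one_cons hlt, List.foldl_cons]
      have hgt := PySem.List.pyGet?_append_length pre_t t v
      have hga := PySem.List.pyGet?_append_length pre_a a w
      have hga' : PySem.List.pyGet? (pre_a ++ w :: a) (pre_t.length : Int) = some w := by
        rw [hlen]; exact hga
      simp only [hgt, hga', Option.getD_some]
      have hshift : ((pre_t ++ [v]).length : Int) = (pre_t.length : Int) + 1 := by simp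
      have happ : pre_t ++ v :: t = (pre_t ++ [v]) ++ t := by simp
      have happ2 : pre_a ++ w :: a = (pre_a ++ [w]) ++ a := by simp
      have ht' : t.length = a.length := by simpa using ht
      have hlen' : (pre_t ++ [v]).length = (pre_a ++ [w]).length := by simp [hlen]
      rw [happ, happ2, ← hshift,
          ih a (pre_t ++ [v]) (pre_a ++ [w]) hlen' ht' (if v < init.1 then (v, w) else init)]
      cases init with
      | mk x y => by_cases h : v < x <;> simp [pvLoop, h]

-- index? gives the first position of m; the year fold reads the matching second component.
theorem pv_findYear_index (ts as_ : List Int) (m : Int) (k : Nat)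
    (hlen : ts.length = as_.length) (hidx : PySem.List.index? ts m = some k) :
    pvFindYear m (ts.zip as_) = (as_[k]?).getD 0 := by
  induction ts generalizing as_ k with
  | nil => simp [PySem.List.index?] at hidx
  | cons v ts ih =>
      obtain ⟨w, as_, rfl⟩ : ∃ w as', as_ = w :: as' := by
        cases as_ with
        | nil => simp at hlen
        | cons w a' => exact ⟨w, a', rfl⟩
      by_cases hv : v = m
      · subst hv
        rw [PySem.List.index?_cons_self] at hidx
        obtain rfl : k = 0 := by simpa using hidx.symm
        simp [pvFindYear]
      · rw [PySem.List.index?_cons_of_ne ts hv] at hidx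
        obtain ⟨k', hk', rfl⟩ : ∃ k', PySem.List.index? ts m = some k' ∧ k = k' + 1 := by
          cases h : PySem.List.index? ts m with
          | none => rw [h] at hidx; simp at hidx
          | some k' => rw [h] at hidx; simp at hidx; exact ⟨k', rfl, hidx.symm⟩
        have hlen' : ts.length = as_.length := by simpa using hlen
        simp [pvFindYear, hv, ih as_ k' hlen' hk']

-- ===== VERDICT (by name: the statement is the Claim_ definition above) =====
theorem annee_temperature_minimale_spec : Claim_equal_annee_temperature_minimale := by
  intro t a _ hpre
  obtain ⟨hne, hlen⟩ := hpre
  obtain ⟨x, ts, rfl⟩ : ∃ x ts, t = x :: ts := by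
    cases t with
    | nil => exact absurd rfl hne
    | cons x ts => exact ⟨x, ts, rfl⟩
  obtain ⟨y, as_, rfl⟩ : ∃ y as', a = y :: as' := by
    cases a with
    | nil => simp at hlen
    | cons y as' => exact ⟨y, as', rfl⟩
  have hlen' : ts.length = as_.length := by simpa using hlen
  unfold Spec_annee_temperature_minimale
  -- reduce A's port to pvLoop on the zipped tails
  have hA : annee_temperature_minimale (x :: ts) (y :: as_) = pvLoop (x, y) (ts.zip as_) := by
    unfold annee_temperature_minimale
    have := pv_fold_range_eq (x :: ts) (y :: as_) [] [] rfl (by simp [hlen']) (x, y)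
    simp only [List.nil_append, List.length_nil, Nat.cast_zero] at this
    have hloop : pvLoop (x, y) ((x :: ts).zip (y :: as_)) = pvLoop (x, y) (ts.zip as_) := by
      simp [pvLoop]
    rw [← hloop, ← this]
    simp [PySem.List.pyGet?_zero_cons]
  rw [hA, pv_loop_eq]
  -- reduce B's port
  unfold annee_temperature_minimale_alt
  have hmin : PySem.List.min? (x :: ts) (fun y => y) = some (ts.foldl min x) :=
    PySem.List.min?_id_cons x ts
  have hfst : (ts.zip as_).map Prod.fst = ts := List.map_fst_zip (by omega : ts.length ≤ as_.length)
  rw [hmin, hfst]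
  set m := ts.foldl min x with hm
  by_cases hxm : x = m
  · have hzero : PySem.List.index? (x :: ts) m = some 0 := by
      rw [← hxm]; exact PySem.List.index?_cons_self x ts
    simp only [hzero, Option.getD_some, if_pos hxm, Nat.cast_zero]
    simp
  · have hle : m ≤ x := pv_foldl_min_le _ _
    have hmem : m ∈ ts := by
      rcases pv_foldl_min_mem ts x with h | h
      · exact absurd h.symm hxm
      · exact h
    obtain ⟨k, hk⟩ : ∃ k, PySem.List.index? ts m = some k := by
      have := (PySem.List.index?_isSome_iff (xs := ts) (v := m)).2 hmem
      cases h : PySem.List.index? ts m with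
      | none => rw [h] at this; simp at this
      | some k => exact ⟨k, rfl⟩
    have hidx : PySem.List.index? (x :: ts) m = some (k + 1) := by
      rw [PySem.List.index?_cons_of_ne ts hxm, hk]; rfl
    simp only [Option.getD_some, if_neg hxm]
    rw [hidx]
    simp only [Option.getD_some]
    rw [pv_findYear_index ts as_ m k hlen' hk]
    have : PySem.List.pyGet? (y :: as_) ((k + 1 : Nat) : Int) = as_[k]? := by
      push_cast
      rw [PySem.List.pyGet?_cons_succ]
      exact PySem.List.pyGet?_natCast as_ k
    rw [this]
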